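-- pv_equiv track=rewrite | github.com/JackZ2024/F5-TTS-SVC | infer_gradio.py | insert_punct
-- ===== SOURCE A (Python) =====
-- import string
--
-- PUNCT = set(string.punctuation + '，。！？；：（）【】《》、')
--
-- def insert_punct(text):
--     result = []
--     i = 0
--     n = len(text)
--
--     while i < n:
--         if i + 1 < n and text[i] == ' ' and text[i + 1] == ' ':
--             # 连续两个空格
--             prev = result[-1] if result else ''
--             if prev not in PUNCT:
--                 result.append('.')  # 插入句号
--                 result.append(' ')  # 插入空格
--             # 跳过两个空格
--             i += 2
--         elif text[i] == ' ':
--             # 单个空格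
--             prev = result[-1] if result else ''
--             if prev not in PUNCT:
--                 result.append(',')  # 插入逗号
--                 result.append(' ')  # 插入空格
--             # 跳过空格
--             i += 1
--         else:
--             result.append(text[i])
--             i += 1
--
--     return ''.join(result)
-- ===== SOURCE B (Python) =====
-- import string
--
-- PUNCT = set(string.punctuation + '，。！？；：（）【】《》、')
--
-- def insert_punct(text):
--     out = []
--     i = 0
--     n = len(text)
--     while i < n:
--         if text[i] != ' ':
--             out.append(text[i])
--             i += 1
--         else:
--             j = i + 1
--             while j < n and text[j] == ' ':
--                 j += 1
--             k = j - i
--             prev = out[-1][-1] if out else ''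
--             if prev not in PUNCT:
--                 out.append('. ' * (k // 2) + (', ' if k % 2 else ''))
--             i = j
--     return ''.join(out)
-- ===== Notes on version B (the rewrite author's own statement) =====
-- stated objective: alternative
-- what changed: Replaces A's greedy two-spaces-at-a-time character state machine with run-length grouping: each maximal run of k spaces is consumed at once and, when the preceding emitted character is not punctuation, a closed-form insertion of k//2 period-space pairs plus a trailing comma-space when k is odd is emitted.
import Mathlib
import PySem

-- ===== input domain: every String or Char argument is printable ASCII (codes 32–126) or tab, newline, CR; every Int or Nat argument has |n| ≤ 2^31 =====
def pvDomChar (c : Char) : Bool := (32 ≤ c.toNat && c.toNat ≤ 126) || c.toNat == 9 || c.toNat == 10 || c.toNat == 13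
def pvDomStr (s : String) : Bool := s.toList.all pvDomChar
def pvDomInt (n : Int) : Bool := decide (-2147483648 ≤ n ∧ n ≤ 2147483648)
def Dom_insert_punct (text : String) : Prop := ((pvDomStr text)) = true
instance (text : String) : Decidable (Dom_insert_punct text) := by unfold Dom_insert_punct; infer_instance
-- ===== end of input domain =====

-- B replaces A's greedy two-spaces-at-a-time scan with run-length grouping of each
-- maximal space run and a closed-form insertion string (objective: alternative decomposition).

-- ===== PORT A =====
-- string.punctuation plus the CJK punctuation A adds; 'prev not in PUNCT' with prev = '' is modelled by Option Char
def PUNCT : List Char := ("!\"#$%&'()*+,-./:;<=>?@[\\]^_`{|}~" ++ "，。！？；：（）【】《》、").toList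

def isPunctO : Option Char → Bool
  | none => false
  | some c => PUNCT.contains c

-- A's while loop: result accumulated in order; result[-1] = res.getLast?
def goA (res : List Char) : List Char → List Char
  | [] => res
  | ' ' :: ' ' :: rest =>
      if isPunctO res.getLast? then goA res rest else goA (res ++ ['.', ' ']) rest
  | ' ' :: rest =>
      if isPunctO res.getLast? then goA res rest else goA (res ++ [',', ' ']) rest
  | c :: rest => goA (res ++ [c]) rest

def insert_punct (text : String) : String := String.ofList (goA [] text.toList)

-- ===== PORT B =====
-- '. ' * (k // 2) + (', ' if k % 2 else '') when prev is not punctuation, else nothing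
def insChunk (punct : Bool) (k : Nat) : List Char :=
  if punct then [] else (List.replicate (k / 2) ['.', ' ']).flatten ++ (if k % 2 = 1 then [',', ' '] else [])

def goB (res : List Char) : List Char → List Char
  | [] => res
  | c :: rest =>
      if c = ' ' then
        let k := 1 + (rest.takeWhile (· = ' ')).length
        goB (res ++ insChunk (isPunctO res.getLast?) k) (rest.dropWhile (· = ' '))
      else goB (res ++ [c]) rest
  termination_by l => l.length
  decreasing_by
    · simpa using Nat.lt_succ_of_le (List.length_dropWhile_le _ _)
    · simp

def insert_punct_alt (text : String) : String := String.ofList (goB [] text.toList)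

-- ===== PRECONDITION & SPEC =====
def Spec_insert_punct (text : String) (out : String) : Prop := out = insert_punct_alt text
instance (text : String) (out : String) : Decidable (Spec_insert_punct text out) := by unfold Spec_insert_punct; infer_instance

-- ===== CLAIM (what is proved, stated in full; the proofs are below) =====
def Claim_equal_insert_punct : Prop := ∀ (text : String), Dom_insert_punct text → Spec_insert_punct text (insert_punct text)

-- ===== LEMMAS AND PROOFS =====

lemma isPunctO_space : isPunctO (some ' ') = false := by decide

lemma getLast?_append_two (res : List Char) (a b : Char) :
    (res ++ [a, b]).getLast? = some b := by
  simp

-- A on one maximal run of k spaces: all-or-nothing, closed-form insertion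
lemma runA (k : Nat) (rest res : List Char) (hk : 1 ≤ k) (hr : rest.head? ≠ some ' ') :
    goA res (List.replicate k ' ' ++ rest) =
      goA (res ++ insChunk (isPunctO res.getLast?) k) rest := by
  induction k using Nat.strong_induction_on generalizing res with
  | _ k ih =>
    match k, hk with
    | 1, _ =>
      -- single space then a non-space (or end)
      cases rest with
      | nil =>
        by_cases hp : isPunctO res.getLast? = true <;>
          simp [goA, insChunk, hp]
      | cons d t =>
        have hd : d ≠ ' ' := by intro h; exact hr (by simp [h])
        by_cases hp : isPunctO res.getLast? = true <;>
          simp [goA, insChunk, hp, hd]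
    | (m + 2), _ =>
      have hrep : List.replicate (m + 2) ' ' ++ rest = ' ' :: ' ' :: (List.replicate m ' ' ++ rest) := by
        simp [List.replicate_succ]
      rw [hrep]
      by_cases hp : isPunctO res.getLast? = true
      · -- punct prev: nothing emitted throughout the run
        rw [show goA res (' ' :: ' ' :: (List.replicate m ' ' ++ rest)) =
              goA res (List.replicate m ' ' ++ rest) by simp [goA, hp]]
        cases m with
        | zero => simp [insChunk, hp]
        | succ m' =>
          rw [ih (m' + 1) (by omega) res (by omega) ]
          simp [insChunk, hp]
      · -- non-punct prev: emit '. ', new last char is ' ' (non-punct), recurse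
        rw [show goA res (' ' :: ' ' :: (List.replicate m ' ' ++ rest)) =
              goA (res ++ ['.', ' ']) (List.replicate m ' ' ++ rest) by simp [goA, hp]]
        have hins : insChunk false (m + 2) = ['.', ' '] ++ insChunk false m := by
          have h2 : (m + 2) / 2 = m / 2 + 1 := by omega
          have h3 : (m + 2) % 2 = m % 2 := by omega
          simp [insChunk, h2, h3, List.replicate_succ]
        cases m with
        | zero =>
          simp only [List.replicate, List.nil_append]
          simp [insChunk, hp]
        | succ m' =>
          rw [ih (m' + 1) (by omega) (res ++ ['.', ' ']) (by omega)]
          rw [getLast?_append_two, isPunctO_space]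
          rw [show isPunctO res.getLast? = false by simpa using hp]
          rw [hins]
          simp [List.append_assoc, insChunk]

lemma takeWhile_space_eq_replicate (l : List Char) :
    l.takeWhile (· = ' ') = List.replicate (l.takeWhile (· = ' ')).length ' ' := by
  apply List.eq_replicate_of_mem
  intro c hc
  have := List.mem_takeWhile_imp hc
  simpa using this

lemma head?_dropWhile_space (l : List Char) :
    (l.dropWhile (· = ' ')).head? ≠ some ' ' := by
  intro h
  have := List.head?_dropWhile_not (p := fun c : Char => decide (c = ' ')) l
  rw [h] at this
  simp at this

lemma goAB_aux : ∀ (n : Nat) (l res : List Char), l.length ≤ n → goA res l = goB res l := by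
  intro n
  induction n with
  | zero =>
    intro l res h
    cases l with
    | nil => simp [goA, goB]
    | cons c t => simp at h
  | succ n ih =>
    intro l res h
    cases l with
    | nil => simp [goA, goB]
    | cons c rest =>
      by_cases hc : c = ' '
      · subst hc
        have hsplit : rest = List.replicate (rest.takeWhile (· = ' ')).length ' ' ++ rest.dropWhile (· = ' ') := by
          conv_lhs => rw [← List.takeWhile_append_dropWhile (p := (· = ' ')) (l := rest)]
          rw [← takeWhile_space_eq_replicate]
        have h1 : (' ' :: rest) = List.replicate ((rest.takeWhile (· = ' ')).length + 1) ' ' ++ rest.dropWhile (· = ' ') := by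
          rw [List.replicate_succ]
          exact congrArg _ hsplit
        conv_lhs => rw [h1]
        rw [runA _ _ res (by omega) (head?_dropWhile_space rest)]
        rw [ih _ _ (le_trans (List.length_dropWhile_le _ _) (by simpa using h))]
        rw [show goB res (' ' :: rest) =
              goB (res ++ insChunk (isPunctO res.getLast?) (1 + (rest.takeWhile (· = ' ')).length))
                  (rest.dropWhile (· = ' ')) from by simp [goB]]
        rw [Nat.add_comm 1 _]
      · rw [show goA res (c :: rest) = goA (res ++ [c]) rest from by simp [goA, hc],
            show goB res (c :: rest) = goB (res ++ [c]) rest from by simp [goB, hc]]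
        exact ih _ _ (by simpa using h)

lemma goAB (l res : List Char) : goA res l = goB res l :=
  goAB_aux l.length l res le_rfl

-- ===== VERDICT (by name: the statement is the Claim_ definition above) =====
theorem insert_punct_spec : Claim_equal_insert_punct := by
  intro text _
  unfold Spec_insert_punct insert_punct insert_punct_alt
  rw [goAB]
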